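-- pv_equiv track=rewrite | github.com/avagyanie/PYTHON_COURSE | Week9/Week9_2/Signal_22.py | solution
-- ===== SOURCE A (Python) =====
-- def solution(inputArray):
--     jump_length = 1
--     while True:
--         for i in inputArray:
--             if i % jump_length == 0:
--                 break
--         else:
--             return jump_length
--         jump_length += 1
-- ===== SOURCE B (Python) =====
-- def solution(inputArray):
--     # Mark every positive divisor of every |element| once, then return the
--     # smallest positive integer that was never marked.
--     covered = set()
--     for i in inputArray:
--         n = abs(i)
--         d = 1
--         while d * d <= n:
--             if n % d == 0:
--                 covered.add(d)
--                 covered.add(n // d)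
--             d += 1
--     k = 1
--     while k in covered:
--         k += 1
--     return k
-- ===== Notes on version B (the rewrite author's own statement) =====
-- stated objective: alternative
-- what changed: Instead of testing candidate jump lengths one by one against every element (unbounded while loop), B enumerates each element's divisors once via the sqrt trick into a set and returns the smallest positive integer not in it; Pre_ excludes arrays containing 0, on which A loops forever.
import Mathlib
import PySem

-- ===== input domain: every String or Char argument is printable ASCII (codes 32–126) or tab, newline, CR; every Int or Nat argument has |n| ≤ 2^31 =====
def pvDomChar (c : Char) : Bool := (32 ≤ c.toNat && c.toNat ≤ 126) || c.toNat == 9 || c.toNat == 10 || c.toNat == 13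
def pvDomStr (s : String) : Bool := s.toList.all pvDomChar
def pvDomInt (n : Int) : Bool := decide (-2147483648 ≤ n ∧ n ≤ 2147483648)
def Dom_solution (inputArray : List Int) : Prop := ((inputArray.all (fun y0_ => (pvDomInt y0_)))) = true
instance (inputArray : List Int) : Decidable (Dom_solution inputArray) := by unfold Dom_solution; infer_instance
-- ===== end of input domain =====

-- B replaces A's one-by-one trial of candidate jump lengths by a divisor-marking set;
-- equivalence is proved on arrays not containing 0 (A never returns on those).

-- ===== PORT A =====
-- A's `while True` loop; the fuel argument only makes the same computation total:
-- max|i|+1 iterations always suffice to reach the answer when 0 ∉ inputArray.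
def solLoopA (xs : List Int) (k : Int) : Nat → Int
  | 0 => k
  | fuel + 1 =>
    if xs.any (fun i => PySem.Int.mod i k == 0) then solLoopA xs (k + 1) fuel else k

def solution (inputArray : List Int) : Int :=
  solLoopA inputArray 1 (inputArray.foldl (fun m i => max m i.natAbs) 0 + 1)

-- ===== PORT B =====
-- inner `while d * d <= n` loop of Source B; the fuel argument only makes the same
-- loop total (n+1 iterations always suffice since the loop runs while d*d <= n)
def divLoopB (n d : Int) (s : PySem.Set Int) : Nat → PySem.Set Int
  | 0 => s
  | fuel + 1 =>
    if d * d ≤ n then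
      divLoopB n (d + 1)
        (if PySem.Int.mod n d == 0 then
          PySem.Set.add (PySem.Set.add s d) (PySem.Int.floordiv n d)
         else s) fuel
    else s

-- `for i in inputArray` loop building `covered`
def coveredB (xs : List Int) : PySem.Set Int :=
  xs.foldl (fun s i => divLoopB ((i.natAbs : Int)) 1 s (((i.natAbs : Int)).toNat + 1)) PySem.Set.empty

-- final `while k in covered` loop; fuel |covered|+1 only makes the same loop total
def findLoopB (s : PySem.Set Int) (k : Int) : Nat → Int
  | 0 => k
  | fuel + 1 => if PySem.Set.contains s k then findLoopB s (k + 1) fuel else k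

def solution_alt (inputArray : List Int) : Int :=
  let covered := coveredB inputArray
  findLoopB covered 1 (covered.length + 1)

-- ===== PRECONDITION & SPEC =====
-- Pre_ excludes arrays containing 0: there A's while-loop never terminates (0 % k == 0 for every k).
def Pre_solution (inputArray : List Int) : Prop := (0 : Int) ∉ inputArray
instance (inputArray : List Int) : Decidable (Pre_solution inputArray) := by unfold Pre_solution; infer_instance

def pvWitness_solution : List Int := ([2, 3] : List Int)

def Spec_solution (inputArray : List Int) (out : Int) : Prop := out = solution_alt inputArray
instance (inputArray : List Int) (out : Int) : Decidable (Spec_solution inputArray out) := by unfold Spec_solution; infer_instance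

-- ===== CLAIM (what is proved, stated in full; the proofs are below) =====
def Claim_equal_solution : Prop := ∀ (inputArray : List Int), Dom_solution inputArray → Pre_solution inputArray → Spec_solution inputArray (solution inputArray)

-- ===== LEMMAS AND PROOFS =====

-- A's per-candidate test, as a proposition: some element is divisible by k
def hitA (xs : List Int) (k : Int) : Bool := xs.any (fun i => PySem.Int.mod i k == 0)

theorem hitA_iff (xs : List Int) (k : Int) : hitA xs k = true ↔ ∃ i ∈ xs, k ∣ i := by
  simp [hitA, PySem.Int.mod_eq_zero_iff_dvd]

-- A's loop returns k + m where m is the first offset with no hit, given enough fuel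
theorem solLoopA_eq (xs : List Int) :
    ∀ (m : Nat) (k : Int) (fuel : Nat), m < fuel →
    hitA xs (k + m) = false → (∀ j : Nat, j < m → hitA xs (k + j) = true) →
    solLoopA xs k fuel = k + m := by
  intro m
  induction m with
  | zero =>
    intro k fuel hf h0 _
    match fuel, hf with
    | fuel + 1, _ =>
      have h0' : hitA xs k = false := by simpa using h0
      simp only [solLoopA, hitA] at h0' ⊢
      rw [h0']
      simp
  | succ m ih =>
    intro k fuel hf hfalse hmin
    match fuel, hf with
    | fuel + 1, hf =>
      have h0 : hitA xs k = true := by simpa using hmin 0 (by omega)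
      simp only [solLoopA, hitA] at h0 ⊢
      rw [h0]
      simp only [if_true]
      have := ih (k + 1) fuel (by omega)
        (by rw [show k + 1 + (m : Int) = k + (m + 1 : Nat) by push_cast; ring]; exact hfalse)
        (by intro j hj
            rw [show k + 1 + (j : Int) = k + (j + 1 : Nat) by push_cast; ring]
            exact hmin (j + 1) (by omega))
      rw [this]; push_cast; ring

-- B's final loop: same first-false characterization
theorem findLoopB_eq (s : PySem.Set Int) :
    ∀ (m : Nat) (k : Int) (fuel : Nat), m < fuel →
    PySem.Set.contains s (k + m) = false → (∀ j : Nat, j < m → PySem.Set.contains s (k + j) = true) →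
    findLoopB s k fuel = k + m := by
  intro m
  induction m with
  | zero =>
    intro k fuel hf h0 _
    match fuel, hf with
    | fuel + 1, _ =>
      simp only [findLoopB]
      simp at h0
      simp [h0]
  | succ m ih =>
    intro k fuel hf hfalse hmin
    match fuel, hf with
    | fuel + 1, hf =>
      have h0 : PySem.Set.contains s k = true := by simpa using hmin 0 (by omega)
      simp only [findLoopB, h0, if_true]
      have := ih (k + 1) fuel (by omega)
        (by rw [show k + 1 + (m : Int) = k + (m + 1 : Nat) by push_cast; ring]; exact hfalse)
        (by intro j hj
            rw [show k + 1 + (j : Int) = k + (j + 1 : Nat) by push_cast; ring]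
            exact hmin (j + 1) (by omega))
      rw [this]; push_cast; ring

theorem self_le_mul_self (d : Int) : d ≤ d * d := by
  by_cases hd : d ≤ 0
  · nlinarith
  · have : 1 ≤ d := by omega
    nlinarith

-- membership in the inner sqrt-loop's result (fuel-style strong induction matching the recursion)
theorem mem_divLoopB (n : Int) :
    ∀ (fuel : Nat) (d : Int), (n + 1 - d).toNat ≤ fuel → 1 ≤ d → ∀ (s : PySem.Set Int) (m : Int),
    (m ∈ divLoopB n d s fuel ↔ m ∈ s ∨ ∃ e : Int, d ≤ e ∧ e * e ≤ n ∧ e ∣ n ∧ (m = e ∨ m = PySem.Int.floordiv n e)) := by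
  intro fuel
  induction fuel with
  | zero =>
    intro d hfe hd s m
    have hstop : ¬ d * d ≤ n := by
      intro h
      have := self_le_mul_self d
      omega
    rw [divLoopB]
    constructor
    · exact Or.inl
    · rintro (h | ⟨e, hde, hee, _, _⟩)
      · exact h
      · exact absurd hee (by nlinarith)
  | succ fuel ih =>
    intro d hfe hd s m
    by_cases hlt : d * d ≤ n
    · rw [divLoopB, if_pos hlt]
      have hd0 : 0 < d := by omega
      have hds := self_le_mul_self d
      have hfe' : (n + 1 - (d + 1)).toNat ≤ fuel := by omega
      rw [ih (d + 1) hfe' (by omega)]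
      by_cases hdvd : d ∣ n
      · have hmod : (PySem.Int.mod n d == 0) = true := by
          simp [(PySem.Int.mod_eq_zero_iff_dvd n d).mpr hdvd]
        rw [hmod]
        simp only [if_true, PySem.Set.mem_add]
        constructor
        · rintro (((hm | hm) | hm) | ⟨e, hde, hee, hen, hme⟩)
          · exact Or.inl hm
          · exact Or.inr ⟨d, le_refl d, hlt, hdvd, Or.inl hm⟩
          · exact Or.inr ⟨d, le_refl d, hlt, hdvd, Or.inr hm⟩
          · exact Or.inr ⟨e, by omega, hee, hen, hme⟩
        · rintro (hm | ⟨e, hde, hee, hen, hme⟩)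
          · exact Or.inl (Or.inl (Or.inl hm))
          · rcases eq_or_lt_of_le hde with heq | hlt'
            · rcases hme with hme | hme
              · exact Or.inl (Or.inl (Or.inr (heq ▸ hme)))
              · exact Or.inl (Or.inr (heq ▸ hme))
            · exact Or.inr ⟨e, by omega, hee, hen, hme⟩
      · have hmod : (PySem.Int.mod n d == 0) = false := by
          simp [PySem.Int.mod_eq_zero_iff_dvd n d, hdvd]
        rw [hmod]
        simp only [Bool.false_eq_true, if_false]
        constructor
        · rintro (hm | ⟨e, hde, hee, hen, hme⟩)
          · exact Or.inl hm
          · exact Or.inr ⟨e, by omega, hee, hen, hme⟩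
        · rintro (hm | ⟨e, hde, hee, hen, hme⟩)
          · exact Or.inl hm
          · rcases eq_or_lt_of_le hde with heq | hlt'
            · exact absurd (heq ▸ hen) hdvd
            · exact Or.inr ⟨e, by omega, hee, hen, hme⟩
    · rw [divLoopB, if_neg hlt]
      constructor
      · exact Or.inl
      · rintro (h | ⟨e, hde, hee, _, _⟩)
        · exact h
        · have hd0 : 0 < d := by omega
          exact absurd hee (by nlinarith)

-- divisor-pair characterization of the sqrt enumeration at d = 1
theorem divisors_char (n m : Int) (hn : 1 ≤ n) :
    (∃ e : Int, 1 ≤ e ∧ e * e ≤ n ∧ e ∣ n ∧ (m = e ∨ m = PySem.Int.floordiv n e)) ↔ (1 ≤ m ∧ m ∣ n) := by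
  constructor
  · rintro ⟨e, he1, hee, hen, hme | hme⟩
    · exact ⟨hme ▸ he1, hme ▸ hen⟩
    · have he0 : 0 < e := by omega
      rw [PySem.Int.floordiv_eq_ediv_of_pos he0] at hme
      have hq : n / e * e = n := Int.ediv_mul_cancel hen
      constructor
      · have : e * 1 ≤ e * (n / e) := by nlinarith
        subst hme; exact le_of_mul_le_mul_left this he0
      · exact hme ▸ Dvd.intro e (by linarith [hq, mul_comm (n / e) e])
  · rintro ⟨hm1, hmn⟩
    have hm0 : 0 < m := by omega
    have hmle : m ≤ n := Int.le_of_dvd (by omega) hmn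
    obtain ⟨c, hc⟩ := hmn
    have hc1 : 1 ≤ c := by nlinarith
    by_cases hsq : m * m ≤ n
    · exact ⟨m, hm1, hsq, ⟨c, hc⟩, Or.inl rfl⟩
    · refine ⟨c, hc1, ?_, ⟨m, by linarith [hc, mul_comm m c]⟩, Or.inr ?_⟩
      · have hcm : c < m := by nlinarith
        nlinarith
      · rw [PySem.Int.floordiv_eq_ediv_of_pos (by omega : (0:Int) < c)]
        rw [hc, Int.mul_ediv_cancel _ (by omega : c ≠ 0)]

theorem mem_coveredB_aux (m : Int) :
    ∀ (xs : List Int) (s : PySem.Set Int), ((0 : Int) ∉ xs) →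
    (m ∈ xs.foldl (fun s i => divLoopB ((i.natAbs : Int)) 1 s (((i.natAbs : Int)).toNat + 1)) s ↔ m ∈ s ∨ ∃ i ∈ xs, 1 ≤ m ∧ m ∣ i) := by
  intro xs
  induction xs with
  | nil => intro s _; simp
  | cons x xs ih =>
    intro s hz
    have hx0 : x ≠ 0 := fun h => hz (by simp [h])
    have hn1 : 1 ≤ ((x.natAbs : Int)) := by
      have := Int.natAbs_pos.mpr hx0; omega
    simp only [List.foldl_cons]
    rw [ih _ (fun h => hz (List.mem_cons_of_mem x h))]
    rw [mem_divLoopB ((x.natAbs : Int)) _ 1 (by omega) (by omega)]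
    rw [divisors_char _ m hn1]
    constructor
    · rintro ((hm | ⟨h1, hdvd⟩) | ⟨i, hi, h1, hdvd⟩)
      · exact Or.inl hm
      · exact Or.inr ⟨x, List.mem_cons_self, h1, Int.dvd_natAbs.mp hdvd⟩
      · exact Or.inr ⟨i, List.mem_cons_of_mem x hi, h1, hdvd⟩
    · rintro (hm | ⟨i, hi, h1, hdvd⟩)
      · exact Or.inl (Or.inl hm)
      · rcases List.mem_cons.mp hi with rfl | hi'
        · exact Or.inl (Or.inr ⟨h1, Int.dvd_natAbs.mpr hdvd⟩)
        · exact Or.inr ⟨i, hi', h1, hdvd⟩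

theorem mem_coveredB (xs : List Int) (hz : (0 : Int) ∉ xs) (m : Int) :
    m ∈ coveredB xs ↔ ∃ i ∈ xs, 1 ≤ m ∧ m ∣ i := by
  rw [coveredB, mem_coveredB_aux m xs PySem.Set.empty hz]
  simp [PySem.Set.empty]

-- the two per-candidate tests agree on positive candidates
theorem contains_eq_hitA (xs : List Int) (hz : (0 : Int) ∉ xs) (k : Int) (hk : 1 ≤ k) :
    PySem.Set.contains (coveredB xs) k = hitA xs k := by
  rw [Bool.eq_iff_iff]
  rw [PySem.Set.contains_iff, mem_coveredB xs hz k, hitA_iff]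
  constructor
  · rintro ⟨i, hi, _, hd⟩; exact ⟨i, hi, hd⟩
  · rintro ⟨i, hi, hd⟩; exact ⟨i, hi, hk, hd⟩

theorem abs_le_fold (xs : List Int) : ∀ i ∈ xs, i.natAbs ≤ xs.foldl (fun m i => max m i.natAbs) 0 :=
  (PySem.List.le_foldl_max_nat xs Int.natAbs 0).2

-- ===== VERDICT (by name: the statement is the Claim_ definition above) =====
theorem solution_spec : Claim_equal_solution := by
  intro xs _ hpre
  unfold Pre_solution at hpre
  unfold Spec_solution solution solution_alt
  set M : Nat := xs.foldl (fun m i => max m i.natAbs) 0 with hM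
  have hpM : hitA xs (1 + (M : Int)) = false := by
    rw [Bool.eq_false_iff]
    intro htrue
    obtain ⟨i, hi, hd⟩ := (hitA_iff xs _).mp htrue
    have hi0 : i ≠ 0 := fun h => hpre (h ▸ hi)
    have hpos : (0 : Int) < (i.natAbs : Int) := by
      have := Int.natAbs_pos.mpr hi0; omega
    have hle : (1 : Int) + M ≤ (i.natAbs : Int) := Int.le_of_dvd hpos (Int.dvd_natAbs.mpr hd)
    have := abs_le_fold xs i hi
    omega
  have hex : ∃ m : Nat, hitA xs (1 + (m : Int)) = false := ⟨M, hpM⟩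
  set m0 : Nat := Nat.find hex with hm0
  have hfalse : hitA xs (1 + (m0 : Int)) = false := Nat.find_spec hex
  have hmin : ∀ j : Nat, j < m0 → hitA xs (1 + (j : Int)) = true := by
    intro j hj
    have := Nat.find_min hex hj
    simpa using this
  have hm0M : m0 ≤ M := Nat.find_min' hex hpM
  -- A's loop
  have hA : solLoopA xs 1 (M + 1) = 1 + (m0 : Int) :=
    solLoopA_eq xs m0 1 (M + 1) (by omega) hfalse hmin
  -- B's set and its candidate test
  have hcont : ∀ j : Nat, PySem.Set.contains (coveredB xs) (1 + (j : Int)) = hitA xs (1 + (j : Int)) := by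
    intro j
    exact contains_eq_hitA xs hpre _ (by omega)
  -- pigeonhole: m0 ≤ |covered|
  have hm0len : m0 ≤ (coveredB xs).length := by
    have hsub : (List.range m0).map (fun j : Nat => (1 : Int) + j) ⊆ coveredB xs := by
      intro y hy
      obtain ⟨j, hj, rfl⟩ := List.mem_map.mp hy
      have hj' : j < m0 := List.mem_range.mp hj
      have := hmin j hj'
      rw [← hcont j] at this
      exact (PySem.Set.contains_iff _ _).mp this
    have hnd : ((List.range m0).map (fun j : Nat => (1 : Int) + j)).Nodup := by
      refine List.Nodup.map ?_ List.nodup_range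
      intro a b hab
      simp only at hab
      omega
    have := (hnd.subperm hsub).length_le
    simpa using this
  have hB : findLoopB (coveredB xs) 1 ((coveredB xs).length + 1) = 1 + (m0 : Int) := by
    refine findLoopB_eq (coveredB xs) m0 1 ((coveredB xs).length + 1) (by omega) ?_ ?_
    · rw [hcont m0]; exact hfalse
    · intro j hj; rw [hcont j]; exact hmin j hj
  show solLoopA xs 1 (M + 1) = findLoopB (coveredB xs) 1 ((coveredB xs).length + 1)
  rw [hA, hB]
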